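-- pv_equiv track=rewrite | github.com/Jahanzeb-git/Reddit-NLP-Roberta- | NLP.py | P_Indicators
-- ===== SOURCE A (Python) =====
-- def P_Indicators (tokenize_text, base_keyword):
--     base_found = 0
--     ind_found = 0
--     base_found = False
--     indicators = ['looking for', 'looking', 'recommend', 'recommendation', 'recommendations', 'advice', 'compare', 'best', 'need', 'trying to find',
--                   'options for','considering', 'searching for', 'seeking', 'opinions on', 'experiences with', 'pros and cons of', 'affordable', 'reliable', 'i want', 'alternative'
--                  ]
--     for token in tokenize_text:
--         for ind in indicators:
--             if token == base_keyword:
--                 base_found += 1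
--             if ind == token:
--                 ind_found += 1
--             if base_found and ind_found >= 1:
--                 return True
--     return False
-- ===== SOURCE B (Python) =====
-- INDICATORS = frozenset({'looking for', 'looking', 'recommend', 'recommendation', 'recommendations', 'advice',
--                         'compare', 'best', 'need', 'trying to find', 'options for', 'considering',
--                         'searching for', 'seeking', 'opinions on', 'experiences with', 'pros and cons of',
--                         'affordable', 'reliable', 'i want', 'alternative'})
--
-- def P_Indicators(tokenize_text, base_keyword):
--     toks = set(tokenize_text)
--     return base_keyword in toks and not toks.isdisjoint(INDICATORS)
-- ===== Notes on version B (the rewrite author's own statement) =====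
-- stated objective: faster
-- what changed: Replaces the nested token-by-indicator scan with integer counters and an early return by building the tokens into a set once and doing one membership test plus one set-disjointness test against a frozenset of indicators.
import Mathlib
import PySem

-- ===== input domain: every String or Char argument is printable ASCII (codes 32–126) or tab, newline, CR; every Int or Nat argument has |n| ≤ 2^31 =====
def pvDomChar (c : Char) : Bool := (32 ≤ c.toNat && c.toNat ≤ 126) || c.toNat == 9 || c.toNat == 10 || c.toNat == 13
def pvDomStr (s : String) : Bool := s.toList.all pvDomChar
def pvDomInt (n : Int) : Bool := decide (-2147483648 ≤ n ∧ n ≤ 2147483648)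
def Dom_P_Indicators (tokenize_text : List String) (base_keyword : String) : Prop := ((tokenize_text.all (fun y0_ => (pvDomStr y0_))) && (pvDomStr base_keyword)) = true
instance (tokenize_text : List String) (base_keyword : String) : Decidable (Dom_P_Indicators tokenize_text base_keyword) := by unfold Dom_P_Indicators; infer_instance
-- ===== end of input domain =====

-- B replaces A's nested counter loops by one token set plus a membership and a disjointness test (simpler, no early-return bookkeeping).

-- ===== PORT A =====
def pvIndicators : List String := ["looking for", "looking", "recommend", "recommendation", "recommendations", "advice", "compare", "best", "need", "trying to find",
  "options for", "considering", "searching for", "seeking", "opinions on", "experiences with", "pros and cons of", "affordable", "reliable", "i want", "alternative"]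

-- inner 'for ind in indicators' loop; 'none' = the early 'return True'
def pvInner : List String → String → String → Int → Int → Option (Int × Int)
  | [], _, _, base_found, ind_found => some (base_found, ind_found)
  | ind :: rest, token, base_keyword, base_found, ind_found =>
      let base_found := if token = base_keyword then base_found + 1 else base_found
      let ind_found := if ind = token then ind_found + 1 else ind_found
      if base_found ≠ 0 ∧ 1 ≤ ind_found then none
      else pvInner rest token base_keyword base_found ind_found

-- outer 'for token in tokenize_text' loop
def pvOuter : List String → String → Int → Int → Bool
  | [], _, _, _ => false
  | token :: ts, base_keyword, base_found, ind_found =>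
      match pvInner pvIndicators token base_keyword base_found ind_found with
      | none => true
      | some (bf, indf) => pvOuter ts base_keyword bf indf

def P_Indicators (tokenize_text : List String) (base_keyword : String) : Bool :=
  pvOuter tokenize_text base_keyword 0 0

-- ===== PORT B =====
def pvIndicatorsSet : PySem.Set String := PySem.Set.ofList ["looking for", "looking", "recommend", "recommendation", "recommendations", "advice", "compare", "best", "need", "trying to find",
  "options for", "considering", "searching for", "seeking", "opinions on", "experiences with", "pros and cons of", "affordable", "reliable", "i want", "alternative"]

def P_Indicators_alt (tokenize_text : List String) (base_keyword : String) : Bool :=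
  let toks : PySem.Set String := PySem.Set.ofList tokenize_text
  PySem.Set.contains toks base_keyword && !(PySem.Set.isdisjoint toks pvIndicatorsSet)

-- ===== PRECONDITION & SPEC =====
def Spec_P_Indicators (tokenize_text : List String) (base_keyword : String) (out : Bool) : Prop := out = P_Indicators_alt tokenize_text base_keyword
instance (tokenize_text : List String) (base_keyword : String) (out : Bool) : Decidable (Spec_P_Indicators tokenize_text base_keyword out) := by unfold Spec_P_Indicators; infer_instance

-- ===== CLAIM (what is proved, stated in full; the proofs are below) =====
def Claim_equal_P_Indicators : Prop := ∀ (tokenize_text : List String) (base_keyword : String), Dom_P_Indicators tokenize_text base_keyword → Spec_P_Indicators tokenize_text base_keyword (P_Indicators tokenize_text base_keyword)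

-- ===== LEMMAS AND PROOFS =====

lemma pv_mem_cons_ne {t ind : String} (rest : List String) (h : ¬ ind = t) :
    t ∈ ind :: rest ↔ t ∈ rest := by
  rw [List.mem_cons]
  constructor
  · rintro (he | hm)
    · exact absurd he.symm h
    · exact hm
  · exact Or.inr

lemma pv_count_cons_ne {t ind : String} (rest : List String) (h : ¬ ind = t) :
    (((ind :: rest).count t : Nat) : Int) = ((rest.count t : Nat) : Int) := by
  simp [List.count_cons]
  exact h

lemma pv_count_cons_eq {t ind : String} (rest : List String) (h : ind = t) :
    (((ind :: rest).count t : Nat) : Int) = ((rest.count t : Nat) : Int) + 1 := by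
  simp [List.count_cons]
  exact h

lemma pvInner_eval : ∀ (L : List String) (t base : String) (bf indf : Int),
    (t = base → 0 < bf) → 0 ≤ bf → 0 ≤ indf → ¬(bf ≠ 0 ∧ 1 ≤ indf) →
    pvInner L t base bf indf =
      if bf ≠ 0 ∧ (1 ≤ indf ∨ t ∈ L) then none
      else some (bf + (if t = base then (L.length : Int) else 0), indf + (L.count t : Int)) := by
  intro L
  induction L with
  | nil =>
    intro t base bf indf hb h0 h1 hinv
    simp [pvInner]
    omega
  | cons ind rest ih =>
    intro t base bf indf hb h0 h1 hinv
    simp only [pvInner]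
    by_cases htb : t = base
    · have hbf : 0 < bf := hb htb
      have hA : (if t = base then bf + 1 else bf) = bf + 1 := if_pos htb
      have hD : (if t = base then ((ind :: rest).length : Int) else 0) = ((ind :: rest).length : Int) := if_pos htb
      have hD' : (if t = base then ((rest.length : Nat) : Int) else 0) = ((rest.length : Nat) : Int) := if_pos htb
      rw [hA]
      by_cases hit : ind = t
      · have hB : (if ind = t then indf + 1 else indf) = indf + 1 := if_pos hit
        rw [hB, if_pos (show bf + 1 ≠ 0 ∧ 1 ≤ indf + 1 by constructor <;> omega)]
        have hC : bf ≠ 0 ∧ (1 ≤ indf ∨ t ∈ ind :: rest) :=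
          ⟨by omega, Or.inr (List.mem_cons.mpr (Or.inl hit.symm))⟩
        rw [if_pos hC]
      · have hB : (if ind = t then indf + 1 else indf) = indf := if_neg hit
        have hmem := pv_mem_cons_ne rest hit (t := t)
        rw [hB]
        by_cases hfire : (bf + 1 ≠ 0 ∧ 1 ≤ indf)
        · rw [if_pos hfire]
          have hC : bf ≠ 0 ∧ (1 ≤ indf ∨ t ∈ ind :: rest) := ⟨by omega, Or.inl hfire.2⟩
          rw [if_pos hC]
        · rw [if_neg hfire]
          rw [ih t base (bf + 1) indf (fun _ => by omega) (by omega) h1 hfire]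
          by_cases hm : (1 ≤ indf ∨ t ∈ rest)
          · rw [if_pos (show bf + 1 ≠ 0 ∧ (1 ≤ indf ∨ t ∈ rest) from ⟨by omega, hm⟩)]
            rw [if_pos (show bf ≠ 0 ∧ (1 ≤ indf ∨ t ∈ ind :: rest) from
              ⟨by omega, hm.imp id hmem.mpr⟩)]
          · rw [if_neg (show ¬(bf + 1 ≠ 0 ∧ (1 ≤ indf ∨ t ∈ rest)) from fun hx => hm hx.2)]
            rw [if_neg (show ¬(bf ≠ 0 ∧ (1 ≤ indf ∨ t ∈ ind :: rest)) from
              fun hx => hm (hx.2.imp id hmem.mp))]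
            rw [hD]
            have hct := pv_count_cons_ne rest hit (t := t)
            have hE : (if t = base then ((rest.length : Nat) : Int) else 0) = ((rest.length : Nat) : Int) := if_pos htb
            rw [hE]
            simp only [Option.some.injEq, Prod.mk.injEq, List.length_cons, hct, and_true,
              true_and] <;> first | omega | (push_cast; omega)
    · have hA : (if t = base then bf + 1 else bf) = bf := if_neg htb
      have hD : (if t = base then ((ind :: rest).length : Int) else 0) = 0 := if_neg htb
      have hE : (if t = base then ((rest.length : Nat) : Int) else 0) = 0 := if_neg htb
      rw [hA]
      by_cases hit : ind = t
      · have hB : (if ind = t then indf + 1 else indf) = indf + 1 := if_pos hit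
        rw [hB]
        by_cases hfire : (bf ≠ 0 ∧ 1 ≤ indf + 1)
        · rw [if_pos hfire]
          rw [if_pos (show bf ≠ 0 ∧ (1 ≤ indf ∨ t ∈ ind :: rest) from
            ⟨hfire.1, Or.inr (List.mem_cons.mpr (Or.inl hit.symm))⟩)]
        · have hbf0 : bf = 0 := by omega
          rw [if_neg hfire]
          rw [ih t base bf (indf + 1) (fun h => absurd h htb) h0 (by omega) (by omega)]
          rw [if_neg (show ¬(bf ≠ 0 ∧ (1 ≤ indf + 1 ∨ t ∈ rest)) from fun hx => hx.1 hbf0)]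
          rw [if_neg (show ¬(bf ≠ 0 ∧ (1 ≤ indf ∨ t ∈ ind :: rest)) from fun hx => hx.1 hbf0)]
          rw [hD, hE]
          have hct := pv_count_cons_eq rest hit (t := t)
          simp only [Option.some.injEq, Prod.mk.injEq, hct, and_true,
            true_and] <;> first | omega | (push_cast; omega)
      · have hB : (if ind = t then indf + 1 else indf) = indf := if_neg hit
        have hmem := pv_mem_cons_ne rest hit (t := t)
        rw [hB]
        rw [if_neg (show ¬(bf ≠ 0 ∧ 1 ≤ indf) from hinv)]
        rw [ih t base bf indf (fun h => absurd h htb) h0 h1 hinv]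
        by_cases hm : (bf ≠ 0 ∧ (1 ≤ indf ∨ t ∈ rest))
        · rw [if_pos hm]
          rw [if_pos (show bf ≠ 0 ∧ (1 ≤ indf ∨ t ∈ ind :: rest) from
            ⟨hm.1, hm.2.imp id hmem.mpr⟩)]
        · rw [if_neg hm]
          rw [if_neg (show ¬(bf ≠ 0 ∧ (1 ≤ indf ∨ t ∈ ind :: rest)) from
            fun hx => hm ⟨hx.1, hx.2.imp id hmem.mp⟩)]
          rw [hD, hE]
          have hct := pv_count_cons_ne rest hit (t := t)
          simp only [Option.some.injEq, Prod.mk.injEq, hct, and_true,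
            true_and] <;> first | omega | (push_cast; omega)

-- one manual unfolding of the first indicator, then pvInner_eval on the tail
lemma pvInner_full (t base : String) (bf indf : Int) (h0 : 0 ≤ bf) (h1 : 0 ≤ indf)
    (hinv : ¬(bf ≠ 0 ∧ 1 ≤ indf)) :
    pvInner pvIndicators t base bf indf =
      if (bf ≠ 0 ∨ t = base) ∧ (1 ≤ indf ∨ t ∈ pvIndicators) then none
      else some (bf + (if t = base then (21 : Int) else 0), indf + (pvIndicators.count t : Int)) := by
  have hL : pvIndicators = "looking for" :: pvIndicators.tail := rfl
  have hlen : ((pvIndicators.tail.length : Nat) : Int) = 20 := by decide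
  rw [hL]
  simp only [pvInner]
  by_cases htb : t = base
  · have hA : (if t = base then bf + 1 else bf) = bf + 1 := if_pos htb
    have hD : (if t = base then (21 : Int) else 0) = 21 := if_pos htb
    have hE : (if t = base then ((pvIndicators.tail.length : Nat) : Int) else 0) = ((pvIndicators.tail.length : Nat) : Int) := if_pos htb
    rw [hA]
    by_cases hit : ("looking for" : String) = t
    · have hB : (if ("looking for" : String) = t then indf + 1 else indf) = indf + 1 := if_pos hit
      rw [hB, if_pos (show bf + 1 ≠ 0 ∧ 1 ≤ indf + 1 by constructor <;> omega)]
      rw [if_pos (show (bf ≠ 0 ∨ t = base) ∧ (1 ≤ indf ∨ t ∈ ("looking for" : String) :: pvIndicators.tail) from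
        ⟨Or.inr htb, Or.inr (List.mem_cons.mpr (Or.inl hit.symm))⟩)]
    · have hB : (if ("looking for" : String) = t then indf + 1 else indf) = indf := if_neg hit
      have hmem := pv_mem_cons_ne pvIndicators.tail hit (t := t)
      rw [hB]
      by_cases hfire : (bf + 1 ≠ 0 ∧ 1 ≤ indf)
      · rw [if_pos hfire]
        rw [if_pos (show (bf ≠ 0 ∨ t = base) ∧ (1 ≤ indf ∨ t ∈ ("looking for" : String) :: pvIndicators.tail) from
          ⟨Or.inr htb, Or.inl hfire.2⟩)]
      · rw [if_neg hfire]
        rw [pvInner_eval _ t base (bf + 1) indf (fun _ => by omega) (by omega) h1 hfire]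
        by_cases hm : (1 ≤ indf ∨ t ∈ pvIndicators.tail)
        · rw [if_pos (show bf + 1 ≠ 0 ∧ (1 ≤ indf ∨ t ∈ pvIndicators.tail) from ⟨by omega, hm⟩)]
          rw [if_pos (show (bf ≠ 0 ∨ t = base) ∧ (1 ≤ indf ∨ t ∈ ("looking for" : String) :: pvIndicators.tail) from
            ⟨Or.inr htb, hm.imp id hmem.mpr⟩)]
        · rw [if_neg (show ¬(bf + 1 ≠ 0 ∧ (1 ≤ indf ∨ t ∈ pvIndicators.tail)) from fun hx => hm hx.2)]
          rw [if_neg (show ¬((bf ≠ 0 ∨ t = base) ∧ (1 ≤ indf ∨ t ∈ ("looking for" : String) :: pvIndicators.tail)) from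
            fun hx => hm (hx.2.imp id hmem.mp))]
          have hct := pv_count_cons_ne pvIndicators.tail hit (t := t)
          rw [hD, hE]
          simp only [Option.some.injEq, Prod.mk.injEq, hct, hlen, and_true,
            true_and] <;> first | omega | (push_cast; omega)
  · have hA : (if t = base then bf + 1 else bf) = bf := if_neg htb
    have hD : (if t = base then (21 : Int) else 0) = 0 := if_neg htb
    have hE : (if t = base then ((pvIndicators.tail.length : Nat) : Int) else 0) = 0 := if_neg htb
    rw [hA]
    by_cases hit : ("looking for" : String) = t
    · have hB : (if ("looking for" : String) = t then indf + 1 else indf) = indf + 1 := if_pos hit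
      rw [hB]
      by_cases hfire : (bf ≠ 0 ∧ 1 ≤ indf + 1)
      · rw [if_pos hfire]
        rw [if_pos (show (bf ≠ 0 ∨ t = base) ∧ (1 ≤ indf ∨ t ∈ ("looking for" : String) :: pvIndicators.tail) from
          ⟨Or.inl hfire.1, Or.inr (List.mem_cons.mpr (Or.inl hit.symm))⟩)]
      · have hbf0 : bf = 0 := by omega
        rw [if_neg hfire]
        rw [pvInner_eval _ t base bf (indf + 1) (fun h => absurd h htb) h0 (by omega) (by omega)]
        rw [if_neg (show ¬(bf ≠ 0 ∧ (1 ≤ indf + 1 ∨ t ∈ pvIndicators.tail)) from fun hx => hx.1 hbf0)]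
        rw [if_neg (show ¬((bf ≠ 0 ∨ t = base) ∧ (1 ≤ indf ∨ t ∈ ("looking for" : String) :: pvIndicators.tail)) from
          fun hx => hx.1.elim (fun hb => hb hbf0) htb)]
        have hct := pv_count_cons_eq pvIndicators.tail hit (t := t)
        rw [hD, hE]
        simp only [Option.some.injEq, Prod.mk.injEq, hct, and_true,
          true_and] <;> first | omega | (push_cast; omega)
    · have hB : (if ("looking for" : String) = t then indf + 1 else indf) = indf := if_neg hit
      have hmem := pv_mem_cons_ne pvIndicators.tail hit (t := t)
      rw [hB]
      rw [if_neg (show ¬(bf ≠ 0 ∧ 1 ≤ indf) from hinv)]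
      rw [pvInner_eval _ t base bf indf (fun h => absurd h htb) h0 h1 hinv]
      by_cases hm : (bf ≠ 0 ∧ (1 ≤ indf ∨ t ∈ pvIndicators.tail))
      · rw [if_pos hm]
        rw [if_pos (show (bf ≠ 0 ∨ t = base) ∧ (1 ≤ indf ∨ t ∈ ("looking for" : String) :: pvIndicators.tail) from
          ⟨Or.inl hm.1, hm.2.imp id hmem.mpr⟩)]
      · rw [if_neg hm]
        rw [if_neg (show ¬((bf ≠ 0 ∨ t = base) ∧ (1 ≤ indf ∨ t ∈ ("looking for" : String) :: pvIndicators.tail)) from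
          fun hx => hx.1.elim (fun hb => hm ⟨hb, hx.2.imp id hmem.mp⟩) htb)]
        have hct := pv_count_cons_ne pvIndicators.tail hit (t := t)
        rw [hD, hE]
        simp only [Option.some.injEq, Prod.mk.injEq, hct, and_true,
          true_and] <;> first | omega | (push_cast; omega)

lemma pvOuter_spec : ∀ (ts : List String) (base : String) (bf indf : Int),
    0 ≤ bf → 0 ≤ indf → ¬(bf ≠ 0 ∧ 1 ≤ indf) →
    pvOuter ts base bf indf =
      decide ((bf ≠ 0 ∨ base ∈ ts) ∧ (1 ≤ indf ∨ ∃ t ∈ ts, t ∈ pvIndicators)) := by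
  intro ts
  induction ts with
  | nil =>
    intro base bf indf h0 h1 hinv
    simp [pvOuter]
    omega
  | cons t ts ih =>
    intro base bf indf h0 h1 hinv
    simp only [pvOuter]
    rw [pvInner_full t base bf indf h0 h1 hinv]
    have hcnt := List.count_pos_iff (a := t) (l := pvIndicators)
    by_cases hfire : ((bf ≠ 0 ∨ t = base) ∧ (1 ≤ indf ∨ t ∈ pvIndicators))
    · rw [if_pos hfire]
      have hgoal : ((bf ≠ 0 ∨ base ∈ t :: ts) ∧ (1 ≤ indf ∨ ∃ x ∈ t :: ts, x ∈ pvIndicators)) :=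
        ⟨hfire.1.imp id (fun h => List.mem_cons.mpr (Or.inl h.symm)),
         hfire.2.imp id (fun h => ⟨t, List.mem_cons_self, h⟩)⟩
      show true = decide ((bf ≠ 0 ∨ base ∈ t :: ts) ∧ (1 ≤ indf ∨ ∃ x ∈ t :: ts, x ∈ pvIndicators))
      exact (decide_eq_true hgoal).symm
    · rw [if_neg hfire]
      have hbf' : 0 ≤ bf + (if t = base then (21:Int) else 0) := by split_ifs <;> omega
      have hif' : 0 ≤ indf + (pvIndicators.count t : Int) := by
        have hnn : (0:Int) ≤ (pvIndicators.count t : Int) := Int.natCast_nonneg _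
        omega
      have hinv' : ¬(bf + (if t = base then (21:Int) else 0) ≠ 0 ∧ 1 ≤ indf + (pvIndicators.count t : Int)) := by
        rintro ⟨ha, hb⟩
        apply hfire
        constructor
        · by_cases h : t = base
          · exact Or.inr h
          · rw [if_neg h] at ha; exact Or.inl (by omega)
        · by_cases h : t ∈ pvIndicators
          · exact Or.inr h
          · have hc0 : pvIndicators.count t = 0 := by
              by_contra hc
              exact h (hcnt.mp (Nat.pos_of_ne_zero hc))
            rw [hc0] at hb; push_cast at hb; exact Or.inl (by omega)
      show pvOuter ts base (bf + (if t = base then (21:Int) else 0)) (indf + (pvIndicators.count t : Int)) =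
        decide ((bf ≠ 0 ∨ base ∈ t :: ts) ∧ (1 ≤ indf ∨ ∃ x ∈ t :: ts, x ∈ pvIndicators))
      rw [ih base _ _ hbf' hif' hinv']
      rw [decide_eq_decide]
      constructor
      · rintro ⟨ha, hb⟩
        constructor
        · rcases ha with ha | ha
          · by_cases h : t = base
            · exact Or.inr (List.mem_cons.mpr (Or.inl h.symm))
            · rw [if_neg h] at ha; exact Or.inl (by omega)
          · exact Or.inr (List.mem_cons.mpr (Or.inr ha))
        · rcases hb with hb | hb
          · by_cases h : t ∈ pvIndicators
            · exact Or.inr ⟨t, List.mem_cons_self, h⟩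
            · have hc0 : pvIndicators.count t = 0 := by
                by_contra hc
                exact h (hcnt.mp (Nat.pos_of_ne_zero hc))
              rw [hc0] at hb; push_cast at hb; exact Or.inl (by omega)
          · rcases hb with ⟨x, hx, hxi⟩
            exact Or.inr ⟨x, List.mem_cons.mpr (Or.inr hx), hxi⟩
      · rintro ⟨ha, hb⟩
        constructor
        · rcases ha with ha | ha
          · left; split_ifs <;> omega
          · rcases List.mem_cons.mp ha with h | h
            · left
              rw [if_pos h.symm]
              omega
            · exact Or.inr h
        · rcases hb with hb | hb
          · left; omega
          · rcases hb with ⟨x, hx, hxi⟩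
            rcases List.mem_cons.mp hx with h | h
            · left
              have hp : 0 < pvIndicators.count t := hcnt.mpr (h ▸ hxi)
              have hp' : (1:Int) ≤ (pvIndicators.count t : Int) := by exact_mod_cast hp
              omega
            · exact Or.inr ⟨x, h, hxi⟩

lemma P_Indicators_eq_decide (ts : List String) (base : String) :
    P_Indicators ts base = decide (base ∈ ts ∧ ∃ t ∈ ts, t ∈ pvIndicators) := by
  rw [P_Indicators, pvOuter_spec ts base 0 0 le_rfl le_rfl (by simp)]
  simp

lemma P_Indicators_alt_eq_decide (ts : List String) (base : String) :
    P_Indicators_alt ts base = decide (base ∈ ts ∧ ∃ t ∈ ts, t ∈ pvIndicators) := by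
  rw [Bool.eq_iff_iff]
  simp only [P_Indicators_alt, PySem.Set.contains, PySem.Set.isdisjoint, Bool.and_eq_true,
    Bool.not_not, List.any_eq_true, List.contains_iff_mem, PySem.Set.mem_ofList,
    decide_eq_true_eq, pvIndicatorsSet]
  tauto

-- ===== VERDICT (by name: the statement is the Claim_ definition above) =====
theorem P_Indicators_spec : Claim_equal_P_Indicators := by
  intro ts base _
  unfold Spec_P_Indicators
  rw [P_Indicators_eq_decide, P_Indicators_alt_eq_decide]
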